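-- pv_equiv track=rewrite | github.com/yue-su/algo | practical_problem/stree_lamp.py | litByOneLight
-- ===== SOURCE A (Python) =====
-- def litByOneLight(lamps):
--     lamp_map = {}
--     res = 0
--     for lamp in lamps:
--         location, radius = lamp
--         for i in range(location - radius, location + radius + 1):
--             if i in lamp_map:
--                 lamp_map[i] += 1
--                 res -= 1
--             else:
--                 lamp_map[i] = 1
--                 res += 1
--
--     return res
-- ===== SOURCE B (Python) =====
-- def litByOneLight(lamps):
--     # union of intervals via sort+merge; answer = 2*|union| - total coverage
--     total = 0
--     ivals = []
--     for loc, r in lamps: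
--         if r >= 0:
--             total += 2 * r + 1
--             ivals.append((loc - r, loc + r))
--     ivals.sort(key=lambda p: p[0])
--     union = 0
--     cur_end = None
--     for s, e in ivals:
--         if cur_end is None or s > cur_end:
--             union += e - s + 1
--             cur_end = e
--         elif e > cur_end:
--             union += e - cur_end
--             cur_end = e
--     return 2 * union - total
-- ===== Notes on version B (the rewrite author's own statement) =====
-- stated objective: faster
-- what changed: Replaces the point-by-point dict over every covered integer with sort-and-merge of intervals: union size from one sorted sweep plus a closed form for total coverage, returning 2*union - total.
import Mathlib
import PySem

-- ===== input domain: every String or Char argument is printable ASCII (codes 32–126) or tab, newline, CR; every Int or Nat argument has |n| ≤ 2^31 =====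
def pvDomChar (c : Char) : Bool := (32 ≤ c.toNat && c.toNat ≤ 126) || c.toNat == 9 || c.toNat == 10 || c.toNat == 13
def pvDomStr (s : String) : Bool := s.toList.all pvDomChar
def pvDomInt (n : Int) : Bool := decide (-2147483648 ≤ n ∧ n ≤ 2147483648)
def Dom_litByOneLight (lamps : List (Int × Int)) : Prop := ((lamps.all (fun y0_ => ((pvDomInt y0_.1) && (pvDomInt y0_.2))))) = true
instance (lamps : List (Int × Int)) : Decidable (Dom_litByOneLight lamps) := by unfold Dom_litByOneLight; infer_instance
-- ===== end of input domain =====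

-- B replaces A's per-point dict loop (O(n·R)) by sort-and-merge of the lamp intervals (O(n log n)):
-- union size from one sorted sweep, total coverage in closed form, result = 2*union - total.

-- ===== PORT A =====
-- Python's dict is a hash map; lamp_map[i] += 1 is insert i (lookup i + 1) (the key is present on that branch)
def litByOneLight (lamps : List (Int × Int)) : Int :=
  (lamps.foldl
    (fun (st : Std.HashMap Int Int × Int) lamp =>
      (PySem.List.pyRange (lamp.1 - lamp.2) (lamp.1 + lamp.2 + 1) 1).foldl
        (fun (st : Std.HashMap Int Int × Int) i =>
          if st.1.contains i then (st.1.insert i (st.1.getD i 0 + 1), st.2 - 1)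
          else (st.1.insert i 1, st.2 + 1))
        st)
    (∅, 0)).2

-- ===== PORT B =====
def litByOneLight_alt (lamps : List (Int × Int)) : Int :=
  let tp : Int × List (Int × Int) :=
    lamps.foldl
      (fun (acc : Int × List (Int × Int)) lamp =>
        if lamp.2 ≥ 0 then
          (acc.1 + 2 * lamp.2 + 1, acc.2 ++ [(lamp.1 - lamp.2, lamp.1 + lamp.2)])
        else acc)
      (0, [])
  let ivals := PySem.List.sorted tp.2 (fun p => p.1)
  let fin : Int × Option Int :=
    ivals.foldl
      (fun (st : Int × Option Int) p =>
        match st.2 with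
        | none => (st.1 + (p.2 - p.1 + 1), some p.2)
        | some ce =>
          if p.1 > ce then (st.1 + (p.2 - p.1 + 1), some p.2)
          else if p.2 > ce then (st.1 + (p.2 - ce), some p.2)
          else st)
      (0, none)
  2 * fin.1 - tp.1

-- ===== PRECONDITION & SPEC =====
def Spec_litByOneLight (lamps : List (Int × Int)) (out : Int) : Prop := out = litByOneLight_alt lamps
instance (lamps : List (Int × Int)) (out : Int) : Decidable (Spec_litByOneLight lamps out) := by unfold Spec_litByOneLight; infer_instance

-- ===== CLAIM (what is proved, stated in full; the proofs are below) =====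
def Claim_equal_litByOneLight : Prop := ∀ (lamps : List (Int × Int)), Dom_litByOneLight lamps → Spec_litByOneLight lamps (litByOneLight lamps)

-- ===== LEMMAS AND PROOFS =====

-- covered points of a list of closed intervals (as (lo, hi) pairs)
noncomputable def covS (ls : List (Int × Int)) : Finset Int :=
  ls.foldr (fun p acc => Finset.Icc p.1 p.2 ∪ acc) ∅

-- total number of points A visits
def totalLen (lamps : List (Int × Int)) : Int :=
  (lamps.map (fun p => ((2 * p.2 + 1).toNat : Int))).sum

def toIval (p : Int × Int) : Int × Int := (p.1 - p.2, p.1 + p.2)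

-- A's inner loop over a list of points: the key set grows by the points, res tracks 2·card − count
theorem innerA (pts : List Int) (m : Std.HashMap Int Int) (res : Int) (K : Finset Int)
    (hK : ∀ x, m.contains x = true ↔ x ∈ K) :
    (∀ x, (pts.foldl
      (fun (st : Std.HashMap Int Int × Int) i =>
        if st.1.contains i then (st.1.insert i (st.1.getD i 0 + 1), st.2 - 1)
        else (st.1.insert i 1, st.2 + 1)) (m, res)).1.contains x = true
        ↔ x ∈ K ∪ pts.toFinset) ∧
    (pts.foldl
      (fun (st : Std.HashMap Int Int × Int) i =>
        if st.1.contains i then (st.1.insert i (st.1.getD i 0 + 1), st.2 - 1)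
        else (st.1.insert i 1, st.2 + 1)) (m, res)).2
      = res + 2 * ((K ∪ pts.toFinset).card : Int)
          - 2 * (K.card : Int) - pts.length := by
  induction pts generalizing m res K with
  | nil =>
    refine ⟨?_, by simp⟩
    intro x
    simpa using hK x
  | cons i t ih =>
    simp only [List.foldl_cons]
    by_cases h : m.contains i = true
    · have hmemK : i ∈ K := (hK i).mp h
      have hK' : ∀ x, (m.insert i (m.getD i 0 + 1)).contains x = true ↔ x ∈ K := by
        intro x
        rw [Std.HashMap.contains_insert]
        constructor
        · intro hx
          rcases Bool.or_eq_true_iff.mp hx with hx | hx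
          · rw [show x = i from (beq_iff_eq.mp hx).symm]; exact hmemK
          · exact (hK x).mp hx
        · intro hx
          exact Bool.or_eq_true_iff.mpr (Or.inr ((hK x).mpr hx))
      have hins : K ∪ insert i t.toFinset = K ∪ t.toFinset := by
        rw [Finset.union_insert, Finset.insert_eq_self.mpr (Finset.mem_union_left _ hmemK)]
      rcases ih (m.insert i (m.getD i 0 + 1)) (res - 1) K hK' with ⟨h1, h2⟩
      constructor
      · intro x
        simp only [h, if_pos, List.toFinset_cons]
        rw [hins]; exact h1 x
      · simp only [h, if_pos, List.toFinset_cons, List.length_cons]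
        rw [h2, hins]; push_cast; ring
    · have hnot : i ∉ K := fun hm => h ((hK i).mpr hm)
      have hK' : ∀ x, (m.insert i 1).contains x = true ↔ x ∈ insert i K := by
        intro x
        rw [Std.HashMap.contains_insert, Finset.mem_insert]
        constructor
        · intro hx
          rcases Bool.or_eq_true_iff.mp hx with hx | hx
          · exact Or.inl (beq_iff_eq.mp hx).symm
          · exact Or.inr ((hK x).mp hx)
        · rintro (rfl | hx)
          · exact Bool.or_eq_true_iff.mpr (Or.inl (beq_iff_eq.mpr rfl))
          · exact Bool.or_eq_true_iff.mpr (Or.inr ((hK x).mpr hx))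
      have hU : insert i K ∪ t.toFinset = K ∪ (i :: t).toFinset := by
        simp [List.toFinset_cons, Finset.union_insert, Finset.insert_union]
      have hcard : (insert i K).card = K.card + 1 := Finset.card_insert_of_notMem hnot
      rcases ih (m.insert i 1) (res + 1) (insert i K) hK' with ⟨h1, h2⟩
      constructor
      · intro x
        simp only [h, if_neg, Bool.false_eq_true, not_false_iff]
        rw [← hU]; exact h1 x
      · simp only [h, if_neg, Bool.false_eq_true, not_false_iff, List.length_cons]
        rw [h2, hU, hcard]; push_cast; ring

theorem pyRange_toFinset (a b : Int) :
    (PySem.List.pyRange a b 1).toFinset = Finset.Icc a (b - 1) := by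
  ext x
  rw [List.mem_toFinset, PySem.List.mem_pyRange_one, Finset.mem_Icc]
  omega

-- A's outer loop
theorem outerA (lamps : List (Int × Int)) (m : Std.HashMap Int Int) (res : Int) (K : Finset Int)
    (hK : ∀ x, m.contains x = true ↔ x ∈ K) :
    (∀ x, (lamps.foldl
      (fun (st : Std.HashMap Int Int × Int) lamp =>
        (PySem.List.pyRange (lamp.1 - lamp.2) (lamp.1 + lamp.2 + 1) 1).foldl
          (fun (st : Std.HashMap Int Int × Int) i =>
            if st.1.contains i then (st.1.insert i (st.1.getD i 0 + 1), st.2 - 1)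
            else (st.1.insert i 1, st.2 + 1)) st) (m, res)).1.contains x = true
        ↔ x ∈ K ∪ covS (lamps.map toIval)) ∧
    (lamps.foldl
      (fun (st : Std.HashMap Int Int × Int) lamp =>
        (PySem.List.pyRange (lamp.1 - lamp.2) (lamp.1 + lamp.2 + 1) 1).foldl
          (fun (st : Std.HashMap Int Int × Int) i =>
            if st.1.contains i then (st.1.insert i (st.1.getD i 0 + 1), st.2 - 1)
            else (st.1.insert i 1, st.2 + 1)) st) (m, res)).2
      = res + 2 * (((K ∪ covS (lamps.map toIval)).card : Int))
          - 2 * (K.card : Int) - totalLen lamps := by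
  induction lamps generalizing m res K with
  | nil =>
    refine ⟨?_, by simp [covS, totalLen]⟩
    intro x
    simp only [List.map_nil]
    simpa [covS] using hK x
  | cons p t ih =>
    simp only [List.foldl_cons, List.map_cons]
    set X := (PySem.List.pyRange (p.1 - p.2) (p.1 + p.2 + 1) 1).foldl
      (fun (st : Std.HashMap Int Int × Int) i =>
        if st.1.contains i then (st.1.insert i (st.1.getD i 0 + 1), st.2 - 1)
        else (st.1.insert i 1, st.2 + 1)) (m, res) with hX
    rcases innerA (PySem.List.pyRange (p.1 - p.2) (p.1 + p.2 + 1) 1) m res K hK with ⟨hK1, hR1⟩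
    rw [← hX] at hK1 hR1
    rw [pyRange_toFinset] at hK1 hR1
    have hbsub : p.1 + p.2 + 1 - 1 = p.1 + p.2 := by ring
    rw [hbsub] at hK1 hR1
    have hlen : ((PySem.List.pyRange (p.1 - p.2) (p.1 + p.2 + 1) 1).length : Int)
        = ((2 * p.2 + 1).toNat : Int) := by
      rw [PySem.List.length_pyRange_one]
      congr 1; omega
    rcases ih X.1 X.2 (K ∪ Finset.Icc (p.1 - p.2) (p.1 + p.2)) hK1 with ⟨hK2, hR2⟩
    rw [Prod.mk.eta] at hK2 hR2
    have hcov : covS (toIval p :: t.map toIval)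
        = Finset.Icc (p.1 - p.2) (p.1 + p.2) ∪ covS (t.map toIval) := by
      simp [covS, toIval]
    constructor
    · intro x
      rw [hcov, ← Finset.union_assoc]; exact hK2 x
    · rw [hR2, hR1, hcov, Finset.union_assoc, hlen]
      have htl : totalLen (p :: t) = ((2 * p.2 + 1).toNat : Int) + totalLen t := by
        simp [totalLen]
      rw [htl]; ring

-- B's accumulation loop
theorem buildB (lamps : List (Int × Int)) (a : Int) (xs : List (Int × Int)) :
    lamps.foldl
      (fun (acc : Int × List (Int × Int)) lamp =>
        if lamp.2 ≥ 0 then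
          (acc.1 + 2 * lamp.2 + 1, acc.2 ++ [(lamp.1 - lamp.2, lamp.1 + lamp.2)])
        else acc) (a, xs)
      = (a + totalLen lamps, xs ++ (lamps.filter (fun p => p.2 ≥ 0)).map toIval) := by
  induction lamps generalizing a xs with
  | nil => simp [totalLen]
  | cons p t ih =>
    by_cases h : p.2 ≥ 0
    · simp only [List.foldl_cons, h, if_pos, ih, List.filter_cons]
      simp only [totalLen, List.map_cons, List.sum_cons, toIval, List.cons_append,
        List.append_assoc, List.singleton_append, Prod.mk.injEq]
      refine ⟨by omega, rfl⟩
    · simp only [List.foldl_cons, h, ite_false, ih, List.filter_cons]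
      simp only [totalLen, List.map_cons, List.sum_cons, Prod.mk.injEq]
      refine ⟨by omega, rfl⟩

theorem card_union_Icc (C : Finset Int) (s e : Int) (h : ∀ x ∈ C, x < s) (hse : s ≤ e) :
    (((C ∪ Finset.Icc s e).card : Int)) = (C.card : Int) + (e - s + 1) := by
  rw [Finset.card_union_of_disjoint]
  · rw [Int.card_Icc]
    push_cast
    omega
  · rw [Finset.disjoint_left]
    intro x hx hx2
    rw [Finset.mem_Icc] at hx2
    exact absurd (h x hx) (by omega)

-- B's sweep over a start-sorted list of nonempty intervals
theorem sweepB (ls : List (Int × Int)) (C : Finset Int) (a ce : Int)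
    (hne : ∀ p ∈ ls, p.1 ≤ p.2) (ha : ∀ p ∈ ls, a ≤ p.1)
    (hsort : ls.Pairwise (fun p q => p.1 ≤ q.1))
    (hub : ∀ x ∈ C, x ≤ ce) (hfill : Finset.Icc a ce ⊆ C) :
    (ls.foldl
      (fun (st : Int × Option Int) p =>
        match st.2 with
        | none => (st.1 + (p.2 - p.1 + 1), some p.2)
        | some ce =>
          if p.1 > ce then (st.1 + (p.2 - p.1 + 1), some p.2)
          else if p.2 > ce then (st.1 + (p.2 - ce), some p.2)
          else st) ((C.card : Int), some ce)).1
      = ((C ∪ covS ls).card : Int) := by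
  induction ls generalizing C a ce with
  | nil => simp [covS]
  | cons p t ih =>
    obtain ⟨s, e⟩ := p
    have hse : s ≤ e := hne (s, e) (by simp)
    have has : a ≤ s := ha (s, e) (by simp)
    have hcov : covS ((s, e) :: t) = Finset.Icc s e ∪ covS t := by simp [covS]
    have ha' : ∀ q ∈ t, s ≤ q.1 := by
      intro q hq
      exact (List.pairwise_cons.mp hsort).1 q hq
    have hne' : ∀ q ∈ t, q.1 ≤ q.2 := fun q hq => hne q (List.mem_cons_of_mem _ hq)
    have hat : ∀ q ∈ t, a ≤ q.1 := fun q hq => ha q (List.mem_cons_of_mem _ hq)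
    have hsort' := (List.pairwise_cons.mp hsort).2
    simp only [List.foldl_cons]
    by_cases h1 : s > ce
    · have hC' : ((C.card : Int) + (e - s + 1)) = (((C ∪ Finset.Icc s e).card : Int)) :=
        (card_union_Icc C s e (fun x hx => lt_of_le_of_lt (hub x hx) h1) hse).symm
      have step : ((if s > ce then ((C.card : Int) + (e - s + 1), some e)
          else if e > ce then ((C.card : Int) + (e - ce), some e)
          else ((C.card : Int), some ce)) : Int × Option Int)
          = (((C ∪ Finset.Icc s e).card : Int), some e) := by
        rw [if_pos h1, hC']
      rw [step, ih (C ∪ Finset.Icc s e) s e hne' ha' hsort'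
        (by intro x hx
            rcases Finset.mem_union.mp hx with hx | hx
            · exact le_trans (hub x hx) (by omega)
            · exact (Finset.mem_Icc.mp hx).2)
        (by intro x hx
            exact Finset.mem_union_right _ hx),
        hcov, Finset.union_assoc]
    · push_neg at h1
      by_cases h2 : e > ce
      · have hCeq : C ∪ Finset.Icc s e = C ∪ Finset.Icc (ce + 1) e := by
          apply Finset.Subset.antisymm
          · intro x hx
            rcases Finset.mem_union.mp hx with hx | hx
            · exact Finset.mem_union_left _ hx
            · rw [Finset.mem_Icc] at hx
              by_cases hxc : x ≤ ce
              · exact Finset.mem_union_left _ (hfill (Finset.mem_Icc.mpr ⟨le_trans has hx.1, hxc⟩))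
              · exact Finset.mem_union_right _ (Finset.mem_Icc.mpr ⟨by omega, hx.2⟩)
          · intro x hx
            rcases Finset.mem_union.mp hx with hx | hx
            · exact Finset.mem_union_left _ hx
            · rw [Finset.mem_Icc] at hx
              exact Finset.mem_union_right _ (Finset.mem_Icc.mpr ⟨by omega, hx.2⟩)
        have hC' : ((C.card : Int) + (e - ce)) = (((C ∪ Finset.Icc s e).card : Int)) := by
          rw [hCeq, card_union_Icc C (ce + 1) e (fun x hx => by have := hub x hx; omega) (by omega)]
          ring
        have step : ((if s > ce then ((C.card : Int) + (e - s + 1), some e)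
            else if e > ce then ((C.card : Int) + (e - ce), some e)
            else ((C.card : Int), some ce)) : Int × Option Int)
            = (((C ∪ Finset.Icc s e).card : Int), some e) := by
          rw [if_neg (not_lt.mpr h1), if_pos h2, hC']
        rw [step, ih (C ∪ Finset.Icc s e) a e hne' hat hsort'
          (by intro x hx
              rcases Finset.mem_union.mp hx with hx | hx
              · exact le_trans (hub x hx) (by omega)
              · exact (Finset.mem_Icc.mp hx).2)
          (by intro x hx
              rw [Finset.mem_Icc] at hx
              by_cases hxc : x ≤ ce
              · exact Finset.mem_union_left _ (hfill (Finset.mem_Icc.mpr ⟨hx.1, hxc⟩))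
              · exact Finset.mem_union_right _ (Finset.mem_Icc.mpr ⟨by omega, hx.2⟩)),
          hcov, Finset.union_assoc]
      · push_neg at h2
        have hsub : Finset.Icc s e ⊆ C := by
          intro x hx
          rw [Finset.mem_Icc] at hx
          exact hfill (Finset.mem_Icc.mpr ⟨le_trans has hx.1, le_trans hx.2 h2⟩)
        have hCeq : C ∪ Finset.Icc s e = C := Finset.union_eq_left.mpr hsub
        have step : ((if s > ce then ((C.card : Int) + (e - s + 1), some e)
            else if e > ce then ((C.card : Int) + (e - ce), some e)
            else ((C.card : Int), some ce)) : Int × Option Int)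
            = (((C.card : Int)), some ce) := by
          rw [if_neg (not_lt.mpr h1), if_neg (not_lt.mpr h2)]
        rw [step, ih C a ce hne' hat hsort' hub hfill, hcov, ← Finset.union_assoc, hCeq]

theorem covS_perm {ls ls' : List (Int × Int)} (h : ls.Perm ls') : covS ls = covS ls' := by
  unfold covS
  exact @List.Perm.foldr_eq _ _ _ _ _
    ⟨fun a b acc => by simp only [Finset.union_left_comm]⟩ h ∅

theorem covS_filter (ls : List (Int × Int)) :
    covS ((ls.filter (fun p => p.2 ≥ 0)).map toIval) = covS (ls.map toIval) := by
  induction ls with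
  | nil => rfl
  | cons p t ih =>
    by_cases h : p.2 ≥ 0
    · simp [covS, List.filter_cons, h, toIval] at ih ⊢
      rw [ih]
    · have hicc : Finset.Icc (toIval p).1 (toIval p).2 = ∅ := by
        apply Finset.Icc_eq_empty; simp [toIval]; omega
      simp [covS, List.filter_cons, h, hicc] at ih ⊢
      rw [ih]

theorem ivals0_mem (lamps : List (Int × Int)) (p : Int × Int)
    (hp : p ∈ (lamps.filter (fun q => q.2 ≥ 0)).map toIval) : p.1 ≤ p.2 := by
  rcases List.mem_map.mp hp with ⟨q, hq, rfl⟩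
  have := List.of_mem_filter hq
  simp only [ge_iff_le, decide_eq_true_eq] at this
  simp only [toIval]
  omega

theorem altEq (lamps : List (Int × Int)) :
    litByOneLight_alt lamps
      = 2 * ((covS ((lamps.filter (fun q => q.2 ≥ 0)).map toIval)).card : Int)
        - totalLen lamps := by
  unfold litByOneLight_alt
  rw [buildB lamps 0 []]
  simp only [List.nil_append, zero_add]
  have hperm : (PySem.List.sorted ((lamps.filter (fun q => q.2 ≥ 0)).map toIval)
      (fun p => p.1)).Perm ((lamps.filter (fun q => q.2 ≥ 0)).map toIval) :=
    PySem.List.sorted_perm _ _ _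
  have hpw : (PySem.List.sorted ((lamps.filter (fun q => q.2 ≥ 0)).map toIval)
      (fun p => p.1)).Pairwise (fun p q => p.1 ≤ q.1) :=
    PySem.List.sorted_pairwise _ _
  rw [← covS_perm hperm]
  cases hss : PySem.List.sorted ((lamps.filter (fun q => q.2 ≥ 0)).map toIval)
      (fun p => p.1) with
  | nil => simp [covS]
  | cons hd rest =>
    obtain ⟨s, e⟩ := hd
    rw [hss] at hpw hperm
    have hmemss : ∀ p ∈ (s, e) :: rest, p.1 ≤ p.2 := by
      intro p hp
      exact ivals0_mem lamps p (hperm.mem_iff.mp hp)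
    have hse : s ≤ e := hmemss (s, e) (List.mem_cons_self)
    simp only [List.foldl_cons]
    rw [show ((0 + (e - s + 1) : Int), (some e : Option Int))
        = (((Finset.Icc s e).card : Int), some e) from by
      rw [Int.card_Icc]
      congr 1
      omega]
    rw [sweepB rest (Finset.Icc s e) s e
      (fun q hq => hmemss q (List.mem_cons_of_mem _ hq))
      (fun q hq => (List.pairwise_cons.mp hpw).1 q hq)
      (List.pairwise_cons.mp hpw).2
      (fun x hx => (Finset.mem_Icc.mp hx).2)
      (fun x hx => hx)]
    have : covS ((s, e) :: rest) = Finset.Icc s e ∪ covS rest := by simp [covS]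
    rw [this]

-- ===== VERDICT (by name: the statement is the Claim_ definition above) =====
theorem litByOneLight_spec : Claim_equal_litByOneLight := by
  intro lamps _
  unfold Spec_litByOneLight
  rcases outerA lamps ∅ 0 ∅ (fun x => by simp [Std.HashMap.contains_empty]) with ⟨_, hA⟩
  unfold litByOneLight
  rw [hA, altEq, covS_filter]
  simp only [Finset.empty_union, Finset.card_empty, Nat.cast_zero]
  ring
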